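-- pv_equiv track=rewrite | github.com/TheRainbowPhoenix/LDS | 00embed.py | best_fence_for
-- ===== SOURCE A (Python) =====
-- def best_fence_for(content: str) -> str:
--     # Use a fence with one more backtick than the longest run in the content
--     longest = 0
--     run = 0
--     for ch in content:
--         if ch == "`":
--             run += 1
--             if run > longest:
--                 longest = run
--         else:
--             run = 0
--     return "`" * max(3, longest + 1)
-- ===== SOURCE B (Python) =====
-- def best_fence_for(content: str) -> str:
--     # Group the content into maximal backtick runs and take the longest one.
--     runs = []
--     rest = content
--     while rest:
--         if rest[0] == "`":
--             k = len(rest) - len(rest.lstrip("`"))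
--             runs.append(k)
--             rest = rest[k:]
--         else:
--             rest = rest[1:]
--     longest = max(runs, default=0)
--     return "`" * max(3, longest + 1)
-- ===== Notes on version B (the rewrite author's own statement) =====
-- stated objective: alternative
-- what changed: B decomposes the string into maximal backtick runs (span/lstrip grouping over the remaining suffix) and takes the maximum run length, instead of A's per-character scan with a running counter and best-so-far update.
import Mathlib
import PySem

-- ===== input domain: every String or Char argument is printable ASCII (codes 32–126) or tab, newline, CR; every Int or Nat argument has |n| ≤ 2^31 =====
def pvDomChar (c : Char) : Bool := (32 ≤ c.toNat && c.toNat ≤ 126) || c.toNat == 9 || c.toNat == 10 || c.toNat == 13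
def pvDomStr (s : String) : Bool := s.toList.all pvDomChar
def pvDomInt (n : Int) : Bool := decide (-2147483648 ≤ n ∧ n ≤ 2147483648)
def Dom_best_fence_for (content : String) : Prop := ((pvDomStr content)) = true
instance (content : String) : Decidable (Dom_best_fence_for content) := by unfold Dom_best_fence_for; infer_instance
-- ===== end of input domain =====

-- B groups the content into maximal backtick runs and maximizes their lengths, replacing A's running-counter scan (alternative decomposition; not faster).


-- ===== PORT A =====
-- literal port: fold over the characters with state (longest, run)
def bffStep (p : Nat × Nat) (ch : Char) : Nat × Nat :=
  if ch = '`' then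
    let run := p.2 + 1
    (if run > p.1 then run else p.1, run)
  else (p.1, 0)

def best_fence_for (content : String) : String :=
  String.ofList (List.replicate (max 3 ((content.toList.foldl bffStep (0, 0)).1 + 1)) '`')

-- ===== PORT B =====
-- B's while loop over the remaining suffix: emit the length of each maximal backtick run
-- (len(rest) - len(rest.lstrip('`')) = length of the leading backtick run = takeWhile; rest[k:] = dropWhile)
def bffRuns (l : List Char) : List Nat :=
  match l with
  | [] => []
  | c :: t =>
    if c = '`' then
      ((c :: t).takeWhile (fun x => x = '`')).length ::
        bffRuns ((c :: t).dropWhile (fun x => x = '`'))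
    else bffRuns t
termination_by l.length
decreasing_by
  · rename_i hc
    simp only [List.dropWhile, hc, decide_true, List.length_cons]
    have h := List.length_dropWhile_le (fun x => decide (x = '`')) t
    omega
  · simp

def best_fence_for_alt (content : String) : String :=
  String.ofList (List.replicate (max 3 ((bffRuns content.toList).foldr max 0 + 1)) '`')

-- ===== PRECONDITION & SPEC =====
def Spec_best_fence_for (content : String) (out : String) : Prop := out = best_fence_for_alt content
instance (content : String) (out : String) : Decidable (Spec_best_fence_for content out) := by unfold Spec_best_fence_for; infer_instance

-- ===== CLAIM (what is proved, stated in full; the proofs are below) =====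
def Claim_equal_best_fence_for : Prop := ∀ (content : String), Dom_best_fence_for content → Spec_best_fence_for content (best_fence_for content)

-- ===== LEMMAS AND PROOFS =====

-- reference: the longest run, given the current run length r, as a plain recursion
def bffBf (r : Nat) : List Char → Nat
  | [] => 0
  | c :: t => if c = '`' then max (r + 1) (bffBf (r + 1) t) else bffBf 0 t

-- A's fold from state (L, r) with L ≥ r computes max L (bffBf r l)
theorem bff_fold_eq (l : List Char) : ∀ (L r : Nat), r ≤ L →
    (l.foldl bffStep (L, r)).1 = max L (bffBf r l) := by
  induction l with
  | nil => intro L r h; simp [bffBf]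
  | cons c t ih =>
    intro L r h
    by_cases hc : c = '`'
    · subst hc
      have h2 : bffStep (L, r) '`' = (max L (r + 1), r + 1) := by
        simp only [bffStep]
        split_ifs <;> simp_all <;> omega
      rw [List.foldl_cons, h2, ih (max L (r + 1)) (r + 1) (le_max_right _ _)]
      have h3 : bffBf r ('`' :: t) = max (r + 1) (bffBf (r + 1) t) := by simp [bffBf]
      rw [h3]
      omega
    · have h2 : bffStep (L, r) c = (L, 0) := by simp [bffStep, hc]
      simp only [List.foldl_cons, h2, bffBf, if_neg hc]
      exact ih L 0 (Nat.zero_le _)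

theorem bff_bf_span (l : List Char) : ∀ (r : Nat),
    max r (bffBf r l) =
      max (r + ((l.takeWhile (fun x => x = '`')).length))
          (bffBf 0 (l.dropWhile (fun x => x = '`'))) := by
  induction l with
  | nil => intro r; simp [bffBf, List.takeWhile, List.dropWhile]
  | cons c t ih =>
    intro r
    by_cases hc : c = '`'
    · subst hc
      simp only [bffBf, List.takeWhile, List.dropWhile, decide_true,
        List.length_cons, if_true]
      have h1 : max r (max (r + 1) (bffBf (r + 1) t)) = max (r + 1) (bffBf (r + 1) t) := by
        omega
      rw [h1, ih (r + 1)]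
      omega
    · simp [bffBf, List.takeWhile, List.dropWhile, hc]

theorem bff_bf_eq_runs : ∀ (n : ℕ) (l : List Char), l.length ≤ n →
    bffBf 0 l = (bffRuns l).foldr max 0 := by
  intro n
  induction n with
  | zero => intro l h; have : l = [] := List.eq_nil_of_length_eq_zero (Nat.le_zero.mp h); subst this; simp [bffBf, bffRuns]
  | succ n ih =>
    intro l h
    match l with
    | [] => simp [bffBf, bffRuns]
    | c :: t =>
      by_cases hc : c = '`'
      · subst hc
        rw [bffRuns]
        simp only []
        have hspan := bff_bf_span ('`' :: t) 0
        simp only [Nat.zero_max, Nat.zero_add] at hspan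
        rw [hspan]
        have hdw : ((('`' :: t).dropWhile (fun x => x = '`'))).length ≤ n := by
          simp only [List.dropWhile, decide_true]
          have := List.length_dropWhile_le (fun x => decide (x = '`')) t
          simp only [List.length_cons] at h
          omega
        rw [ih _ hdw]
        simp
      · rw [bffRuns]
        simp only [if_neg hc]
        rw [bffBf, if_neg hc]
        exact ih t (by simp at h; omega)

-- ===== VERDICT (by name: the statement is the Claim_ definition above) =====
theorem best_fence_for_spec : Claim_equal_best_fence_for := by
  intro content _
  unfold Spec_best_fence_for best_fence_for best_fence_for_alt
  have h := bff_fold_eq content.toList 0 0 (le_refl 0)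
  have h2 := bff_bf_eq_runs content.toList.length content.toList (le_refl _)
  simp only [Nat.zero_max] at h
  rw [h, h2]
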